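-- pv_equiv track=rewrite | github.com/AdrianSuliga/Concurrency-Theory | traces_theory/util.py | get_dependent_transactions
-- ===== SOURCE A (Python) =====
-- def get_dependent_transactions(transactions: dict[str, list[str]]) -> set[tuple[str, str]]:
--     transaction_keys = transactions.keys()
--     result = set()
--
--     for outer_key in transaction_keys:
--         left = transactions[outer_key][0]
--
--         for inner_key in transaction_keys:
--             for var in transactions[inner_key]:
--                 if left == var:
--                     # mutually dependent
--                     result.add((outer_key, inner_key))
--                     result.add((inner_key, outer_key))
--                     # no need for further search in the inner loop
--                     break
--
--     return result
-- ===== SOURCE B (Python) =====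
-- def get_dependent_transactions(transactions: dict[str, list[str]]) -> set[tuple[str, str]]:
--     # Build a variable -> keys index in one pass (each key listed once per variable),
--     # then for each key look up the keys that use its first variable.
--     index = {}
--     for key, variables in transactions.items():
--         seen = set()
--         for v in variables:
--             if v not in seen:
--                 seen.add(v)
--                 index.setdefault(v, []).append(key)
--
--     result = set()
--     for key, variables in transactions.items():
--         left = variables[0]
--         for other in index.get(left, []):
--             result.add((key, other))
--             result.add((other, key))
--     return result
-- ===== Notes on version B (the rewrite author's own statement) =====
-- stated objective: faster
-- what changed: Replaces A's nested scan over all key pairs (with an inner linear scan of each value list) by a variable-to-keys index built in one pass, so each key's first variable is answered by a single index lookup instead of rescanning every transaction.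
-- outside the precondition, e.g. on get_dependent_transactions({'a': []}): A raises IndexError, B raises IndexError
import Mathlib
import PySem

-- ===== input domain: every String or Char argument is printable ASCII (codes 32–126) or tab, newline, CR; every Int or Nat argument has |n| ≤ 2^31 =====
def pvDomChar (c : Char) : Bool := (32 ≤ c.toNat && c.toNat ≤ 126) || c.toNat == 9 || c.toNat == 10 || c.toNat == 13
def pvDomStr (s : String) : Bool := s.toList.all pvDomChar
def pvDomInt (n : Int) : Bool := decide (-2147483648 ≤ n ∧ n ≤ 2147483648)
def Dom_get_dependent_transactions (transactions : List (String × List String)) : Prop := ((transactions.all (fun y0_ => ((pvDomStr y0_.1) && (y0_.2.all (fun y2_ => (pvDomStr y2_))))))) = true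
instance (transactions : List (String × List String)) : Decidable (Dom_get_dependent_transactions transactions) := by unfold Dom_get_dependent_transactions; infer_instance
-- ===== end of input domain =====

-- B replaces A's quadratic key-pair scan by a variable→keys index built in one pass (objective: faster).

-- ===== PORT A =====
-- inner 'for var in transactions[inner_key]: if left == var: add both pairs; break'
def pvScanVars (res : PySem.Set (String × String)) (left outer inner : String) :
    List String → PySem.Set (String × String)
  | [] => res
  | v :: rest =>
    if left == v then
      PySem.Set.add (PySem.Set.add res (outer, inner)) (inner, outer)
    else
      pvScanVars res left outer inner rest

def get_dependent_transactions (transactions : List (String × List String)) : List (String × String) :=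
  let d := PySem.Dict.mk transactions
  let transaction_keys := d.keys
  transaction_keys.foldl
    (fun res outer_key =>
      let left := PySem.List.pyGetD (d.getD outer_key []) 0 ""   -- transactions[outer_key][0]; empty value lists are outside Pre_
      transaction_keys.foldl
        (fun res inner_key => pvScanVars res left outer_key inner_key (d.getD inner_key []))
        res)
    PySem.Set.empty

-- ===== PORT B =====
-- 'for v in variables: if v not in seen: seen.add(v); index.setdefault(v, []).append(key)'
def pvIndexVars (idx : PySem.Dict String (List String)) (key : String) :
    List String → PySem.Set String → PySem.Dict String (List String)
  | [], _ => idx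
  | v :: rest, seen =>
    if PySem.Set.contains seen v then
      pvIndexVars idx key rest seen
    else
      pvIndexVars (idx.insert v (idx.getD v [] ++ [key])) key rest (PySem.Set.add seen v)

def get_dependent_transactions_alt (transactions : List (String × List String)) : List (String × String) :=
  let index := transactions.foldl (fun idx p => pvIndexVars idx p.1 p.2 PySem.Set.empty) PySem.Dict.empty
  transactions.foldl
    (fun res p =>
      let left := PySem.List.pyGetD p.2 0 ""   -- variables[0]; empty value lists are outside Pre_
      (index.getD left []).foldl
        (fun res other => PySem.Set.add (PySem.Set.add res (p.1, other)) (other, p.1))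
        res)
    PySem.Set.empty

-- ===== PRECONDITION & SPEC =====
-- Pre_ excludes (a) entries with an empty variable list, on which Python A raises IndexError
-- (transactions[outer_key][0]), and (b) association lists with duplicate keys, which cannot
-- arise from a Python dict (dict construction merges them) and are only a representation artefact.
def Pre_get_dependent_transactions (transactions : List (String × List String)) : Prop :=
  (transactions.map Prod.fst).Nodup ∧ ∀ p ∈ transactions, p.2 ≠ []
instance (transactions : List (String × List String)) : Decidable (Pre_get_dependent_transactions transactions) := by unfold Pre_get_dependent_transactions; infer_instance

def pvWitness_get_dependent_transactions : (List (String × List String)) :=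
  [("T1", ["x", "y"]), ("T2", ["y", "x"]), ("T3", ["z"])]

def Spec_get_dependent_transactions (transactions : List (String × List String)) (out : List (String × String)) : Prop := out = get_dependent_transactions_alt transactions
instance (transactions : List (String × List String)) (out : List (String × String)) : Decidable (Spec_get_dependent_transactions transactions out) := by unfold Spec_get_dependent_transactions; infer_instance

-- ===== CLAIM (what is proved, stated in full; the proofs are below) =====
def Claim_equal_get_dependent_transactions : Prop := ∀ (transactions : List (String × List String)), Dom_get_dependent_transactions transactions → Pre_get_dependent_transactions transactions → Spec_get_dependent_transactions transactions (get_dependent_transactions transactions)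

-- ===== LEMMAS AND PROOFS =====

-- A's inner var scan with break adds the two pairs iff left occurs in the list.
theorem pvScanVars_eq (res : PySem.Set (String × String)) (left outer inner : String)
    (vars : List String) :
    pvScanVars res left outer inner vars =
      if left ∈ vars then
        PySem.Set.add (PySem.Set.add res (outer, inner)) (inner, outer)
      else res := by
  induction vars with
  | nil => simp [pvScanVars]
  | cons v rest ih =>
    by_cases h : left = v
    · subst h; simp [pvScanVars]
    · simp [pvScanVars, h, ih, List.mem_cons]

-- index contents after indexing one entry's variable list (seen-set dedups repeats).
theorem pvIndexVars_getD (key : String) (vars : List String) :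
    ∀ (idx : PySem.Dict String (List String)) (seen : PySem.Set String) (v : String),
    (pvIndexVars idx key vars seen).getD v [] =
      if v ∈ vars ∧ v ∉ seen then idx.getD v [] ++ [key] else idx.getD v [] := by
  induction vars with
  | nil => intro idx seen v; simp [pvIndexVars]
  | cons h rest ih =>
    intro idx seen v
    by_cases hs : h ∈ seen
    · have : PySem.Set.contains seen h = true := by
        simpa [PySem.Set.contains] using hs
      rw [pvIndexVars, if_pos this, ih]
      by_cases hv : v = h
      · subst hv; simp [hs]
      · simp [List.mem_cons, hv]
    · have : ¬ PySem.Set.contains seen h = true := by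
        simpa [PySem.Set.contains] using hs
      rw [pvIndexVars, if_neg this, ih]
      by_cases hv : v = h
      · subst hv
        simp [hs]
      · simp [List.mem_cons, hv, PySem.Set.mem_add, PySem.Dict.getD_insert]

-- the full index maps a variable to the keys (in order) whose lists contain it.
theorem pvBuildIndex_getD (transactions : List (String × List String)) :
    ∀ (idx : PySem.Dict String (List String)) (v : String),
    (transactions.foldl (fun idx p => pvIndexVars idx p.1 p.2 PySem.Set.empty) idx).getD v [] =
      idx.getD v [] ++ (transactions.filter (fun p => decide (v ∈ p.2))).map Prod.fst := by
  induction transactions with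
  | nil => intro idx v; simp
  | cons p rest ih =>
    intro idx v
    simp only [List.foldl_cons, ih, pvIndexVars_getD]
    by_cases hv : v ∈ p.2
    · simp [hv, PySem.Set.empty]
    · simp [hv, PySem.Set.empty]

-- a conditional fold over entries equals the plain fold over the filtered keys.
theorem foldl_filter_keys {β : Type} (g : β → String → β) (pred : List String → Prop)
    [DecidablePred pred] :
    ∀ (l : List (String × List String)) (res : β),
    l.foldl (fun res q => if pred q.2 then g res q.1 else res) res =
      ((l.filter (fun q => decide (pred q.2))).map Prod.fst).foldl g res := by
  intro l
  induction l with
  | nil => intro res; simp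
  | cons q rest ih =>
    intro res
    by_cases h : pred q.2
    · simp [h, ih]
    · simp [h, ih]

-- with unique keys, dict lookup of an entry's key returns that entry's value.
theorem lookup_entry (transactions : List (String × List String))
    (hnd : (transactions.map Prod.fst).Nodup) :
    ∀ p ∈ transactions, (PySem.Dict.mk transactions).getD p.1 [] = p.2 := by
  intro p hp
  have hk : (PySem.Dict.mk transactions).keys.Nodup := by
    simpa [PySem.Dict.keys, PySem.Dict.items] using hnd
  have hm : (p.1, p.2) ∈ (PySem.Dict.mk transactions).items := by
    simpa [PySem.Dict.items] using hp
  exact PySem.Dict.getD_of_mem_items _ hm hk []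

-- the common reformulation both ports are reduced to
def pvCore (tr : List (String × List String)) : List (String × String) :=
  tr.foldl
    (fun res p =>
      ((tr.filter (fun q => decide (PySem.List.pyGetD p.2 0 "" ∈ q.2))).map Prod.fst).foldl
        (fun res other => PySem.Set.add (PySem.Set.add res (p.1, other)) (other, p.1)) res)
    PySem.Set.empty

theorem A_eq_core (tr : List (String × List String))
    (hnd : (tr.map Prod.fst).Nodup) : get_dependent_transactions tr = pvCore tr := by
  have hV := lookup_entry tr hnd
  unfold get_dependent_transactions pvCore
  show ((tr.map Prod.fst).foldl _ _) = _
  rw [List.foldl_map]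
  apply PySem.List.foldl_congr_mem
  intro res p hp
  show ((tr.map Prod.fst).foldl _ _) = _
  rw [List.foldl_map, hV p hp]
  rw [PySem.List.foldl_congr_mem _ _
        (fun res q => if PySem.List.pyGetD p.2 0 "" ∈ q.2 then
            PySem.Set.add (PySem.Set.add res (p.1, q.1)) (q.1, p.1) else res) _
        (by intro acc q hq
            rw [hV q hq, pvScanVars_eq])]
  exact foldl_filter_keys (fun res other => PySem.Set.add (PySem.Set.add res (p.1, other)) (other, p.1)) (fun vs => PySem.List.pyGetD p.2 0 "" ∈ vs) tr res

theorem B_eq_core (tr : List (String × List String)) :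
    get_dependent_transactions_alt tr = pvCore tr := by
  unfold get_dependent_transactions_alt pvCore
  apply PySem.List.foldl_congr_mem
  intro res p _hp
  show (((tr.foldl (fun idx p => pvIndexVars idx p.1 p.2 PySem.Set.empty)
      PySem.Dict.empty).getD (PySem.List.pyGetD p.2 0 "") []).foldl _ _) = _
  rw [pvBuildIndex_getD]
  simp [PySem.Dict.getD_empty]

-- ===== VERDICT (by name: the statement is the Claim_ definition above) =====
theorem get_dependent_transactions_spec : Claim_equal_get_dependent_transactions := by
  intro transactions _hdom hpre
  obtain ⟨hnd, _hne⟩ := hpre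
  unfold Spec_get_dependent_transactions
  rw [A_eq_core transactions hnd, B_eq_core transactions]
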